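-- pv_equiv track=rewrite | github.com/rookedsysc/algorithm | 프로그래머스/2/43165. 타겟 넘버/타겟 넘버.py | solution
-- ===== SOURCE A (Python) =====
-- from collections import deque
--
-- def solution(numbers, target):
--     q = deque([0])
--
--     for n in numbers :
--         next_q = deque()
--         while q :
--             cur_v = q.popleft()
--             next_q.append(cur_v + n)
--             next_q.append(cur_v - n)
--         q = next_q
--     cnt = 0
--     for i in q :
--         if i == target :
--             cnt += 1
--     return cnt
-- ===== SOURCE B (Python) =====
-- def solution(numbers, target):
--     dp = {0: 1}
--     for n in numbers:
--         nxt = {}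
--         for s, c in dp.items():
--             nxt[s + n] = nxt.get(s + n, 0) + c
--             nxt[s - n] = nxt.get(s - n, 0) + c
--         dp = nxt
--     return dp.get(target, 0)
-- ===== Notes on version B (the rewrite author's own statement) =====
-- stated objective: faster
-- what changed: Replaced the exponential breadth-first enumeration of all 2^n signed sums with dynamic programming over a dict mapping each reachable sum to its multiplicity.
import Mathlib
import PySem

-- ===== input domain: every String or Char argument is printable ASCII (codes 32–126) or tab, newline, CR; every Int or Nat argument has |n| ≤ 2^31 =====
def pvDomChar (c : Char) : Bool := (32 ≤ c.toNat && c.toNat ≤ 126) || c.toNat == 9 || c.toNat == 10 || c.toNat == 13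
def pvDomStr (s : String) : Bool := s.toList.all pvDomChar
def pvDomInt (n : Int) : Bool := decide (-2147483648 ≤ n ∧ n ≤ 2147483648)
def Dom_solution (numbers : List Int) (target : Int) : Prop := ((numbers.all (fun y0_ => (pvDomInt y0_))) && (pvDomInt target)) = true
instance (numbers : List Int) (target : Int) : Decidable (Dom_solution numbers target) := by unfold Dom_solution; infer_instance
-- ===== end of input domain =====

-- B replaces A's exponential enumeration of all signed sums with a dict-based DP counting
-- multiplicities of each reachable sum (objective: faster, asymptotic change).

-- ===== PORT A =====
-- A: breadth-first expansion: for each n, every queued value v is replaced by v+n and v-n;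
-- finally count occurrences of target in the fully expanded queue.
def solution (numbers : List Int) (target : Int) : Int :=
  let q : List Int :=
    numbers.foldl (fun q n => q.foldl (fun acc v => acc ++ [v + n, v - n]) ([] : List Int)) [0]
  q.foldl (fun cnt i => if i == target then cnt + 1 else cnt) 0

-- ===== PORT B =====
-- B: DP step — for each (s, c) in the current dict, add c to the counts of s+n and s-n in the next dict.
def bStep (d : PySem.Dict Int Int) (n : Int) : PySem.Dict Int Int :=
  d.items.foldl (fun nd p =>
    let nd1 := nd.insert (p.1 + n) (nd.getD (p.1 + n) 0 + p.2)
    nd1.insert (p.1 - n) (nd1.getD (p.1 - n) 0 + p.2)) PySem.Dict.empty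

def solution_alt (numbers : List Int) (target : Int) : Int :=
  (numbers.foldl bStep ((PySem.Dict.empty : PySem.Dict Int Int).insert 0 1)).getD target 0

-- ===== PRECONDITION & SPEC =====
def Spec_solution (numbers : List Int) (target : Int) (out : Int) : Prop := out = solution_alt numbers target
instance (numbers : List Int) (target : Int) (out : Int) : Decidable (Spec_solution numbers target out) := by unfold Spec_solution; infer_instance

-- ===== CLAIM (what is proved, stated in full; the proofs are below) =====
def Claim_equal_solution : Prop := ∀ (numbers : List Int) (target : Int), Dom_solution numbers target → Spec_solution numbers target (solution numbers target)

-- ===== LEMMAS AND PROOFS =====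

-- counting in the expanded queue: each v contributes v+n and v-n
lemma count_flatMap_sign (q : List Int) (n t : Int) :
    (q.flatMap (fun v => [v + n, v - n])).count t = q.count (t - n) + q.count (t + n) := by
  induction q with
  | nil => simp
  | cons v q ih =>
    simp only [List.flatMap_cons, List.count_append, List.count_cons, ih, List.count_nil]
    have h1 : (v + n == t) = (v == t - n) := by
      by_cases h : v = t - n <;> simp [h] <;> omega
    have h2 : (v - n == t) = (v == t + n) := by
      by_cases h : v = t + n <;> simp [h] <;> omega
    rw [h1, h2]; ring

-- lookup after the two inserts one loop iteration performs
lemma getD_two_inserts (nd : PySem.Dict Int Int) (a b t c : Int) :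
    ((nd.insert a (nd.getD a 0 + c)).insert b
      ((nd.insert a (nd.getD a 0 + c)).getD b 0 + c)).getD t 0
    = nd.getD t 0 + ((if a = t then c else 0) + (if b = t then c else 0)) := by
  simp only [PySem.Dict.getD_insert]
  split_ifs <;> try subst_vars
  all_goals try exact absurd rfl (by assumption)
  all_goals ring

-- the two-insert fold: each pair (s, c) contributes c at s+n and c at s-n
lemma getD_bStepList (l : List (Int × Int)) (nd : PySem.Dict Int Int) (n t : Int) :
    (l.foldl (fun nd p =>
      let nd1 := nd.insert (p.1 + n) (nd.getD (p.1 + n) 0 + p.2)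
      nd1.insert (p.1 - n) (nd1.getD (p.1 - n) 0 + p.2)) nd).getD t 0
    = nd.getD t 0
      + (l.map (fun p => (if p.1 + n = t then p.2 else 0) + (if p.1 - n = t then p.2 else 0))).sum := by
  induction l generalizing nd with
  | nil => simp
  | cons p l ih =>
    simp only [List.foldl_cons, List.map_cons, List.sum_cons, ih]
    rw [getD_two_inserts]
    ring

-- selecting one key from an assoc list with distinct keys is a lookup
lemma sum_ite_key_not_mem (l : List (Int × Int)) (k : Int) (h : k ∉ l.map Prod.fst) :
    (l.map (fun p => if p.1 = k then p.2 else 0)).sum = 0 := by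
  induction l with
  | nil => simp
  | cons p l ih =>
    simp only [List.map_cons, List.mem_cons, not_or] at h ⊢
    rw [List.sum_cons, if_neg (by exact fun hh => h.1 (by simp [hh])), ih h.2]
    simp

lemma sum_ite_key (l : List (Int × Int)) (hnd : (l.map Prod.fst).Nodup) (k : Int) :
    (l.map (fun p => if p.1 = k then p.2 else 0)).sum = (PySem.Dict.mk l).getD k 0 := by
  induction l with
  | nil => simp [PySem.Dict.getD_eq_get?_getD, PySem.Dict.get?]
  | cons p l ih =>
    simp only [List.map_cons, List.nodup_cons] at hnd
    rw [List.map_cons, List.sum_cons,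
      PySem.Dict.getD_eq_get?_getD, PySem.Dict.get?_mk_cons]
    by_cases h : p.1 = k
    · rw [if_pos h, sum_ite_key_not_mem l k (h ▸ hnd.1)]
      simp [h]
    · rw [if_neg h, ih hnd.2, PySem.Dict.getD_eq_get?_getD]
      simp [show (p.1 == k) = false by simp [h]]

-- keys stay distinct through the two-insert fold
lemma nodup_bStepList (l : List (Int × Int)) (nd : PySem.Dict Int Int) (n : Int)
    (h : nd.keys.Nodup) :
    (l.foldl (fun nd p =>
      let nd1 := nd.insert (p.1 + n) (nd.getD (p.1 + n) 0 + p.2)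
      nd1.insert (p.1 - n) (nd1.getD (p.1 - n) 0 + p.2)) nd).keys.Nodup := by
  induction l generalizing nd with
  | nil => exact h
  | cons p l ih =>
    exact ih _ (PySem.Dict.nodup_keys_insert _ _ _ (PySem.Dict.nodup_keys_insert _ _ _ h))

-- one DP step matches one expansion step
lemma getD_bStep (d : PySem.Dict Int Int) (n t : Int) (hnd : d.keys.Nodup) :
    (bStep d n).getD t 0 = d.getD (t - n) 0 + d.getD (t + n) 0 := by
  have hsum := getD_bStepList d.items PySem.Dict.empty n t
  rw [bStep, hsum, PySem.Dict.getD_empty, zero_add]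
  have hsplit : (d.items.map (fun p => (if p.1 + n = t then p.2 else 0) + (if p.1 - n = t then p.2 else 0))).sum
      = (d.items.map (fun p => if p.1 = t - n then p.2 else 0)).sum
        + (d.items.map (fun p => if p.1 = t + n then p.2 else 0)).sum := by
    rw [← PySem.List.sum_map_add_int]
    apply congrArg
    apply List.map_congr_left
    intro p _
    have e1 : (p.1 + n = t) = (p.1 = t - n) := by
      apply propext; constructor <;> intro <;> omega
    have e2 : (p.1 - n = t) = (p.1 = t + n) := by
      apply propext; constructor <;> intro <;> omega
    simp only [e1, e2]
  rw [hsplit, sum_ite_key d.items hnd (t - n), sum_ite_key d.items hnd (t + n)]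

-- main invariant: the DP dict holds exactly the multiset of queued sums
lemma main_inv (numbers : List Int) (d : PySem.Dict Int Int) (q : List Int)
    (hnd : d.keys.Nodup) (hinv : ∀ t, d.getD t 0 = (q.count t : Int)) :
    (∀ t, (numbers.foldl bStep d).getD t 0
      = (((numbers.foldl (fun q n => q.flatMap (fun v => [v + n, v - n])) q).count t : Nat) : Int)) := by
  induction numbers generalizing d q with
  | nil => exact hinv
  | cons n ns ih =>
    simp only [List.foldl_cons]
    apply ih
    · exact nodup_bStepList _ _ _ PySem.Dict.nodup_keys_empty
    · intro t
      rw [getD_bStep d n t hnd, hinv, hinv, count_flatMap_sign]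
      push_cast; ring

-- ===== VERDICT (by name: the statement is the Claim_ definition above) =====
theorem solution_spec : Claim_equal_solution := by
  intro numbers target _
  show solution numbers target = solution_alt numbers target
  rw [solution, solution_alt]
  have hinner : (fun (q : List Int) (n : Int) => q.foldl (fun acc v => acc ++ [v + n, v - n]) ([] : List Int))
      = fun q n => q.flatMap (fun v => [v + n, v - n]) := by
    funext q n
    rw [PySem.List.foldl_append_eq_flatMap]
    simp
  rw [hinner, PySem.List.foldl_beq_add_one, zero_add]
  rw [main_inv numbers _ [0] (PySem.Dict.nodup_keys_insert _ _ _ PySem.Dict.nodup_keys_empty)]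
  intro t
  rw [PySem.Dict.getD_insert]
  by_cases h : t = 0 <;> simp [h, List.count_cons, PySem.Dict.getD_empty] <;> omega
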